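-- pv_equiv track=rewrite | github.com/yaldashbz/comic-seg | src/dataset/utils.py | convert_list_counts_to_seg_list
-- ===== SOURCE A (Python) =====
-- def convert_list_counts_to_seg_list(mask):
--     mask_size = mask['size']
--     counts = mask['counts']
--     counts[0] == counts[0] % 10000
--
--     # Initialize variables
--     coords = []
--     current_x = 0
--     current_y = 0
--
--     # Process the counts to create the list of coordinates
--     for i in range(0, len(counts), 2):
--         run_length = counts[i]
--
--         for _ in range(run_length):
--             coords.append([current_x, current_y])
--
--             current_x += 1
--             if current_x == mask_size[0]:
--                 current_x = 0
--                 current_y += 1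
--
--     return coords
-- ===== SOURCE B (Python) =====
-- def convert_list_counts_to_seg_list(mask):
--     width = mask['size'][0]
--     total = sum(mask['counts'][0::2])
--     return [[j % width, j // width] for j in range(total)]
-- ===== Notes on version B (the rewrite author's own statement) =====
-- stated objective: simpler
-- what changed: Replaces the nested run-expansion loops with incremental x/y wrap counters by summing the even-index run lengths (counts[0::2]) and mapping each pixel index j to (j % width, j // width) in closed form; Pre_ excludes inputs where A raises and the degenerate masks (nonpositive width, negative run lengths) that are meaningless as RLE, where A's never-wrapping / silently-skipping values are implementation accidents.
-- outside the precondition, e.g. on convert_list_counts_to_seg_list({'size': [0], 'counts': [2]}): A returns [[0, 0], [1, 0]], B raises ZeroDivisionError; on convert_list_counts_to_seg_list({'size': [3], 'counts': [2, 0, -2]}): A returns [[0, 0], [1, 0]], B returns []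
import Mathlib
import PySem

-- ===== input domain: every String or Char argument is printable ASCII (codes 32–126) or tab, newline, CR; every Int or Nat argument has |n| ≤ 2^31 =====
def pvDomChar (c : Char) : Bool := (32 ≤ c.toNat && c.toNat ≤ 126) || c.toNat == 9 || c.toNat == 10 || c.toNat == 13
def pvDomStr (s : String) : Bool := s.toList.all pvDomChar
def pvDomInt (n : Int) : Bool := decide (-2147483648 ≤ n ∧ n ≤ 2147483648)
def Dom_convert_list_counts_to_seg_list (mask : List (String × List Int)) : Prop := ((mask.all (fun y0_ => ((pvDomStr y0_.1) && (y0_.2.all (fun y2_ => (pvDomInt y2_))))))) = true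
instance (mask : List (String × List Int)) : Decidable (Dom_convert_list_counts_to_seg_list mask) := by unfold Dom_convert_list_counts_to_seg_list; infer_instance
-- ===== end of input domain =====

-- B replaces A's nested run-expansion loops (with incremental x/y wrap counters) by summing the
-- even-index run lengths and mapping each pixel index to (x, y) in closed form: simpler, same cost.

-- ===== PORT A =====
def convert_list_counts_to_seg_list (mask : List (String × List Int)) : List (List Int) :=
  let mask_size := ((PySem.Dict.mk mask).get? "size").getD []        -- mask['size']   (KeyError → outside Pre_)
  let counts := ((PySem.Dict.mk mask).get? "counts").getD []         -- mask['counts'] (KeyError → outside Pre_)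
  -- Python line `counts[0] == counts[0] % 10000` is a no-op comparison whose result is discarded;
  -- it only raises IndexError when counts == [] (outside Pre_), so it contributes nothing here.
  ((PySem.List.pyRange 0 (counts.length : Int) 2).foldl
    (fun st i =>
      let run_length := (PySem.List.pyGet? counts i).getD 0          -- counts[i], i in range so the default never fires
      (PySem.List.pyRange 0 run_length 1).foldl
        (fun st _ =>
          let coords := st.1 ++ [[st.2.1, st.2.2]]
          let x := st.2.1 + 1
          -- mask_size[0]: only reached when a pixel is appended; IndexError cases are outside Pre_
          if x = (PySem.List.pyGet? mask_size 0).getD 0 then (coords, 0, st.2.2 + 1)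
          else (coords, x, st.2.2))
        st)
    (([] : List (List Int)), (0 : Int), (0 : Int))).1

-- ===== PORT B =====
def convert_list_counts_to_seg_list_alt (mask : List (String × List Int)) : List (List Int) :=
  let width := (PySem.List.pyGet? (((PySem.Dict.mk mask).get? "size").getD []) 0).getD 0
      -- mask['size'][0]; KeyError/IndexError → outside Pre_
  let total := ((PySem.List.slice? (((PySem.Dict.mk mask).get? "counts").getD []) (some 0) none 2).getD []).sum
      -- sum(mask['counts'][0::2])
  (PySem.List.pyRange 0 total 1).map
    (fun j => [PySem.Int.mod j width, PySem.Int.floordiv j width])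
      -- j % width, j // width; width = 0 (ZeroDivisionError) is outside Pre_

-- ===== PRECONDITION & SPEC =====
-- the elements of xs at even indices (the run lengths A expands; = xs[0::2])
def evensList : List Int → List Int
  | [] => []
  | [a] => [a]
  | a :: _ :: t => a :: evensList t

-- Pre_ excludes the inputs on which A raises (missing 'size'/'counts' key, empty counts, empty size
-- reached with a positive run) and the degenerate masks that are meaningless as RLE — nonpositive
-- width or a negative even-index run length — where A's accidental values (x never wraps; negative
-- runs silently skipped) match nothing B's arithmetic would produce: B raises on width 0 and
-- returns the plain floor-division values otherwise.
def Pre_convert_list_counts_to_seg_list (mask : List (String × List Int)) : Prop :=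
  ((PySem.Dict.mk mask).get? "counts").getD [] ≠ [] ∧
  0 < (PySem.List.pyGet? (((PySem.Dict.mk mask).get? "size").getD []) 0).getD 0 ∧
  ∀ c ∈ evensList (((PySem.Dict.mk mask).get? "counts").getD []), 0 ≤ c
instance (mask : List (String × List Int)) : Decidable (Pre_convert_list_counts_to_seg_list mask) := by
  unfold Pre_convert_list_counts_to_seg_list; infer_instance

def pvWitness_convert_list_counts_to_seg_list : (List (String × List Int)) :=
  [("size", [3]), ("counts", [4, 2, 3])]

def Spec_convert_list_counts_to_seg_list (mask : List (String × List Int)) (out : List (List Int)) : Prop := out = convert_list_counts_to_seg_list_alt mask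
instance (mask : List (String × List Int)) (out : List (List Int)) : Decidable (Spec_convert_list_counts_to_seg_list mask out) := by unfold Spec_convert_list_counts_to_seg_list; infer_instance

-- ===== CLAIM (what is proved, stated in full; the proofs are below) =====
def Claim_equal_convert_list_counts_to_seg_list : Prop := ∀ (mask : List (String × List Int)), Dom_convert_list_counts_to_seg_list mask → Pre_convert_list_counts_to_seg_list mask → Spec_convert_list_counts_to_seg_list mask (convert_list_counts_to_seg_list mask)

-- ===== LEMMAS AND PROOFS =====

-- A's inner-loop body, for a fixed wrap width w
def stepA (w : Int) (st : List (List Int) × Int × Int) : List (List Int) × Int × Int :=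
  let coords := st.1 ++ [[st.2.1, st.2.2]]
  let x := st.2.1 + 1
  if x = w then (coords, 0, st.2.2 + 1) else (coords, x, st.2.2)

-- A's loop state after n pixels have been emitted
def stateN (w : Int) (n : Nat) : List (List Int) × Int × Int :=
  if 0 < w then ((List.range n).map (fun j : Nat => [(j : Int) % w, (j : Int) / w]), (n : Int) % w, (n : Int) / w)
  else ((List.range n).map (fun j : Nat => [(j : Int), 0]), (n : Int), 0)

-- total number of emitted pixels
def totalN (cs : List Int) : Nat := ((evensList cs).map Int.toNat).sum

theorem step_state (w : Int) (n : Nat) : stepA w (stateN w n) = stateN w (n + 1) := by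
  have hcoords : ∀ f : Nat → List Int, (List.range (n + 1)).map f = (List.range n).map f ++ [f n] := by
    intro f; rw [List.range_succ, List.map_append, List.map_singleton]
  by_cases hw : 0 < w
  · have hd : w * ((n : Int) / w) + (n : Int) % w = (n : Int) := Int.mul_ediv_add_emod _ _
    simp only [stepA, stateN, if_pos hw]
    by_cases hc : (n : Int) % w + 1 = w
    · have e : ((n + 1 : Nat) : Int) = w * ((n : Int) / w + 1) := by push_cast; linarith
      have h1 : ((n + 1 : Nat) : Int) % w = 0 := by rw [e]; exact Int.mul_emod_right w _
      have h2 : ((n + 1 : Nat) : Int) / w = (n : Int) / w + 1 := by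
        rw [e]; exact Int.mul_ediv_cancel_left _ (by omega)
      rw [if_pos hc, hcoords, h1, h2]
    · have hb : 0 ≤ (n : Int) % w := Int.emod_nonneg _ (by omega)
      have hlt : (n : Int) % w < w := Int.emod_lt_of_pos _ hw
      have e : ((n + 1 : Nat) : Int) = ((n : Int) % w + 1) + w * ((n : Int) / w) := by push_cast; linarith
      have h1 : ((n + 1 : Nat) : Int) % w = (n : Int) % w + 1 := by
        rw [e, Int.add_mul_emod_self_left]; exact Int.emod_eq_of_lt (by omega) (by omega)
      have h2 : ((n + 1 : Nat) : Int) / w = (n : Int) / w := by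
        rw [e, Int.add_mul_ediv_left _ _ (by omega : w ≠ 0), Int.ediv_eq_zero_of_lt (by omega) (by omega)]
        ring
      rw [if_neg hc, hcoords, h1, h2]
  · simp only [stepA, stateN, if_neg hw]
    have hc : ¬((n : Int) + 1 = w) := by omega
    rw [if_neg hc, hcoords]
    push_cast
    rfl

theorem foldl_const_step {α : Type} (w : Int) (l : List α) :
    ∀ n : Nat, l.foldl (fun st _ => stepA w st) (stateN w n) = stateN w (n + l.length) := by
  induction l with
  | nil => intro n; simp
  | cons a t ih =>
      intro n
      simp only [List.foldl_cons, List.length_cons]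
      rw [step_state w n, ih (n + 1)]
      congr 1
      omega

theorem inner_run (w r : Int) (n : Nat) :
    (PySem.List.pyRange 0 r 1).foldl (fun st _ => stepA w st) (stateN w n) = stateN w (n + r.toNat) := by
  rw [foldl_const_step w _ n, PySem.List.length_pyRange_one]
  norm_num

theorem rangeTwo (L : Nat) :
    PySem.List.pyRange 0 (L : Int) 2 = (List.range ((L + 1) / 2)).map (fun k : Nat => ((2 * k : Nat) : Int)) := by
  rw [PySem.List.pyRange_of_pos 0 (L : Int) (by norm_num)]
  have h : (if (0 : Int) < (L : Int) then (((L : Int) - 0 + 2 - 1) / 2).toNat else 0) = (L + 1) / 2 := by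
    split_ifs with h <;> omega
  rw [h]
  exact List.map_congr_left (fun k _ => by push_cast; ring)

theorem outer_run (w : Int) : ∀ (cs : List Int) (n : Nat),
    (List.range ((cs.length + 1) / 2)).foldl
      (fun st k =>
        (PySem.List.pyRange 0 ((PySem.List.pyGet? cs ((2 * k : Nat) : Int)).getD 0) 1).foldl
          (fun st _ => stepA w st) st)
      (stateN w n) = stateN w (n + totalN cs)
  | [], n => by simp [totalN, evensList]
  | [a], n => by
      have h : (([a] : List Int).length + 1) / 2 = 1 := by simp
      rw [h, List.range_one, List.foldl_cons, List.foldl_nil]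
      have hg : (PySem.List.pyGet? [a] ((2 * 0 : Nat) : Int)).getD 0 = a := by simp
      rw [hg, inner_run]
      simp [totalN, evensList]
  | a :: b :: t, n => by
      have h : ((a :: b :: t).length + 1) / 2 = (t.length + 1) / 2 + 1 := by simp; omega
      rw [h, List.range_succ_eq_map, List.foldl_cons, List.foldl_map]
      have hg : (PySem.List.pyGet? (a :: b :: t) ((2 * 0 : Nat) : Int)).getD 0 = a := by simp
      rw [hg, inner_run]
      have hsh : ∀ k : Nat, (PySem.List.pyGet? (a :: b :: t) ((2 * Nat.succ k : Nat) : Int)) =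
          PySem.List.pyGet? t ((2 * k : Nat) : Int) := by
        intro k
        rw [PySem.List.pyGet?_natCast, PySem.List.pyGet?_natCast]
        show (a :: b :: t)[2 * (k + 1)]? = t[2 * k]?
        have h2 : 2 * (k + 1) = 2 * k + 1 + 1 := by omega
        rw [h2, List.getElem?_cons_succ, List.getElem?_cons_succ]
      have hbody : (fun (st : List (List Int) × Int × Int) (k : Nat) =>
            (PySem.List.pyRange 0 ((PySem.List.pyGet? (a :: b :: t) ((2 * Nat.succ k : Nat) : Int)).getD 0) 1).foldl
              (fun st _ => stepA w st) st)
          = (fun st k =>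
            (PySem.List.pyRange 0 ((PySem.List.pyGet? t ((2 * k : Nat) : Int)).getD 0) 1).foldl
              (fun st _ => stepA w st) st) := by
        funext st k; rw [hsh k]
      rw [hbody, outer_run w t (n + a.toNat)]
      have he : totalN (a :: b :: t) = a.toNat + totalN t := by simp [totalN, evensList]
      rw [he]
      congr 1
      omega

-- counts[0::2] is exactly evensList
theorem filterMap_evens : ∀ (xs : List Int),
    (List.range ((xs.length + 1) / 2)).filterMap (fun k => xs[2 * k]?) = evensList xs
  | [] => by simp [evensList]
  | [a] => by simp [evensList]
  | a :: b :: t => by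
      have h : ((a :: b :: t).length + 1) / 2 = (t.length + 1) / 2 + 1 := by simp; omega
      rw [h, List.range_succ_eq_map, List.filterMap_cons, List.filterMap_map]
      have hsh : ((fun k : Nat => (a :: b :: t)[2 * k]?) ∘ Nat.succ) = (fun k : Nat => t[2 * k]?) := by
        funext k
        have h2 : 2 * (k + 1) = 2 * k + 1 + 1 := by omega
        simp only [Function.comp, Nat.succ_eq_add_one, h2, List.getElem?_cons_succ]
      rw [hsh, filterMap_evens t]
      simp [evensList]

theorem slice_two_evens (xs : List Int) :
    PySem.List.slice? xs (some 0) none 2 = some (evensList xs) := by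
  simp only [PySem.List.slice?, PySem.List.sliceIndices]
  norm_num
  have hcount : (if 0 < xs.length then (((xs.length : Int) + 2 - 1) / 2).toNat else 0)
      = (xs.length + 1) / 2 := by split_ifs with h <;> omega
  rw [hcount]
  have hfun : (fun k : Nat => xs[((2 : Int) * (k : Int)).toNat]?) = (fun k : Nat => xs[2 * k]?) := by
    funext k
    have e : ((2 : Int) * (k : Int)).toNat = 2 * k := by omega
    rw [e]
  rw [hfun, filterMap_evens]

theorem sum_nonneg_toNat : ∀ (l : List Int), (∀ c ∈ l, 0 ≤ c) → l.sum = (((l.map Int.toNat).sum : Nat) : Int)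
  | [], _ => by simp
  | a :: t, h => by
      have ha : 0 ≤ a := h a (by simp)
      have ht := sum_nonneg_toNat t (fun c hc => h c (List.mem_cons_of_mem _ hc))
      simp only [List.sum_cons, List.map_cons, ht]
      push_cast
      omega

theorem evens_sum (cs : List Int) (h : ∀ c ∈ evensList cs, 0 ≤ c) :
    (evensList cs).sum = (totalN cs : Int) := by
  unfold totalN
  exact sum_nonneg_toNat _ h

theorem ports_eq (mask : List (String × List Int))
    (hpre : Pre_convert_list_counts_to_seg_list mask) :
    convert_list_counts_to_seg_list mask = convert_list_counts_to_seg_list_alt mask := by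
  obtain ⟨-, hw, hnn⟩ := hpre
  simp only [convert_list_counts_to_seg_list, convert_list_counts_to_seg_list_alt]
  set sz := ((PySem.Dict.mk mask).get? "size").getD [] with hsz
  set cs := ((PySem.Dict.mk mask).get? "counts").getD [] with hcs
  set w := (PySem.List.pyGet? sz 0).getD 0 with hwd
  rw [slice_two_evens cs]
  show ((PySem.List.pyRange 0 (cs.length : Int) 2).foldl
      (fun st i =>
        (PySem.List.pyRange 0 ((PySem.List.pyGet? cs i).getD 0) 1).foldl
          (fun st _ => stepA w st) st)
      (([] : List (List Int)), (0 : Int), (0 : Int))).1 = _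
  have hinit : (([] : List (List Int)), (0 : Int), (0 : Int)) = stateN w 0 := by
    simp [stateN]
  rw [hinit, rangeTwo cs.length, List.foldl_map, outer_run w cs 0, Nat.zero_add]
  have htot : ((some (evensList cs)).getD []).sum = (totalN cs : Int) := by
    rw [Option.getD_some]; exact evens_sum cs hnn
  rw [htot]
  simp only [stateN, if_pos hw]
  rw [PySem.List.pyRange_zero_nat, List.map_map]
  exact (List.map_congr_left (fun k _ => by
    simp [PySem.Int.mod_eq_emod_of_pos hw, PySem.Int.floordiv_eq_ediv_of_pos hw])).symm

-- ===== VERDICT (by name: the statement is the Claim_ definition above) =====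
theorem convert_list_counts_to_seg_list_spec : Claim_equal_convert_list_counts_to_seg_list := by
  intro mask _ hpre
  unfold Spec_convert_list_counts_to_seg_list
  exact ports_eq mask hpre
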